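-- pv_equiv track=rewrite | github.com/irtiza1999/Data-Structure-Python | numberFactor.py | numberFactor
-- ===== SOURCE A (Python) =====
-- def numberFactor(n):
--     if n in (0, 1, 2):
--         return 1
--     elif n == 3:
--         return 2
--     else:
--         sub1 = numberFactor(n - 1)
--         sub2 = numberFactor(n - 3)
--         sub3 = numberFactor(n - 4)
--         return sub1 + sub2 + sub3
-- ===== SOURCE B (Python) =====
-- def numberFactor(n):
--     # Bottom-up DP with a rolling 4-value window: O(n) instead of A's O(3^n) recursion.
--     if n <= 2:
--         return 1
--     if n == 3:
--         return 2
--     a, b, c, d = 1, 1, 1, 2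
--     for _ in range(4, n + 1):
--         a, b, c, d = b, c, d, d + b + a
--     return d
-- ===== Notes on version B (the rewrite author's own statement) =====
-- stated objective: faster
-- what changed: Replaces the exponential three-way recursion with a bottom-up dynamic-programming loop keeping only the last four values in a rolling window; intended as faster (a timing run's measurement varies run to run, with A timing out on larger inputs).
import Mathlib
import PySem

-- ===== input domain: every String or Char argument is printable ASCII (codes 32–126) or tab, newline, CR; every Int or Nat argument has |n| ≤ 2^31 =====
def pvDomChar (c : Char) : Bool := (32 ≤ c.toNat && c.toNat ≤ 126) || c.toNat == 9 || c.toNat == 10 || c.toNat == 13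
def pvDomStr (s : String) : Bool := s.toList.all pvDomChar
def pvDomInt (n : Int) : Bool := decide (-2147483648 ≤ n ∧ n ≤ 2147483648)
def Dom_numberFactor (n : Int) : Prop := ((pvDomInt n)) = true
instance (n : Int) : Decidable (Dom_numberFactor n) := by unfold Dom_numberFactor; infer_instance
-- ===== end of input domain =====

-- B replaces A's exponential three-way recursion by a bottom-up DP loop over a rolling 4-value
-- window; intended as faster (a timing run's measurement varies run to run, A timing out on larger inputs).


-- ===== PORT A =====
-- A's recursion, literally, on the natural-number view of n (Pre_ restricts to 0 ≤ n,
-- where Python's recursion terminates): returns of 1/1/1/2 at 0,1,2,3, else the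
-- three-way sum f(n-1)+f(n-3)+f(n-4) in A's order.
def numberFactorNat : Nat → Int
  | 0 => 1
  | 1 => 1
  | 2 => 1
  | 3 => 2
  | (k+4) => numberFactorNat (k+3) + numberFactorNat (k+1) + numberFactorNat k

def numberFactor (n : Int) : Int := numberFactorNat n.toNat

-- ===== PORT B =====
-- Source B's loop body: (a,b,c,d) -> (b,c,d,d+b+a)
def altStep (st : Int × Int × Int × Int) : Int × Int × Int × Int :=
  (st.2.1, st.2.2.1, st.2.2.2, st.2.2.2 + st.2.1 + st.1)

def numberFactor_alt (n : Int) : Int :=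
  if n ≤ 2 then 1
  else if n = 3 then 2
  else ((PySem.List.pyRange 4 (n+1) 1).foldl (fun st _ => altStep st) (1, 1, 1, 2)).2.2.2

-- ===== PRECONDITION & SPEC =====
-- Pre_ excludes negative n, on which Python's A recurses without a base case and raises RecursionError.
def Pre_numberFactor (n : Int) : Prop := 0 ≤ n
instance (n : Int) : Decidable (Pre_numberFactor n) := by unfold Pre_numberFactor; infer_instance
def pvWitness_numberFactor : Int := (7)

def Spec_numberFactor (n : Int) (out : Int) : Prop := out = numberFactor_alt n
instance (n : Int) (out : Int) : Decidable (Spec_numberFactor n out) := by unfold Spec_numberFactor; infer_instance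

-- ===== CLAIM (what is proved, stated in full; the proofs are below) =====
def Claim_equal_numberFactor : Prop := ∀ (n : Int), Dom_numberFactor n → Pre_numberFactor n → Spec_numberFactor n (numberFactor n)

-- ===== LEMMAS AND PROOFS =====

-- A fold whose step ignores the list element is iteration of the step, length-many times.
theorem foldl_const_step (l : List Int) (init : Int × Int × Int × Int) :
    l.foldl (fun st _ => altStep st) init = altStep^[l.length] init := by
  induction l generalizing init with
  | nil => rfl
  | cons x xs ih => simp [List.foldl_cons, ih, Function.iterate_succ_apply]

-- The rolling window after k iterations holds f k, f (k+1), f (k+2), f (k+3).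
theorem iterate_window (k : Nat) :
    altStep^[k] (1, 1, 1, 2) =
      (numberFactorNat k, numberFactorNat (k+1), numberFactorNat (k+2), numberFactorNat (k+3)) := by
  induction k with
  | zero => rfl
  | succ k ih =>
    rw [Function.iterate_succ_apply', ih]
    show (numberFactorNat (k+1), numberFactorNat (k+2), numberFactorNat (k+3),
          numberFactorNat (k+3) + numberFactorNat (k+1) + numberFactorNat k) = _
    rw [show numberFactorNat (k+4) = numberFactorNat (k+3) + numberFactorNat (k+1) + numberFactorNat k from rfl]

-- ===== VERDICT (by name: the statement is the Claim_ definition above) =====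
theorem numberFactor_spec : Claim_equal_numberFactor := by
  intro n _ hpre
  unfold Pre_numberFactor at hpre
  unfold Spec_numberFactor numberFactor numberFactor_alt
  by_cases h2 : n ≤ 2
  · rw [if_pos h2]
    interval_cases n <;> rfl
  · rw [if_neg h2]
    by_cases h3 : n = 3
    · subst h3; rfl
    · rw [if_neg h3, foldl_const_step, PySem.List.length_pyRange_one, iterate_window]
      have h4 : 4 ≤ n := by omega
      have : (n + 1 - 4).toNat + 3 = n.toNat := by omega
      rw [this]
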